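-- pv_equiv track=rewrite | github.com/Vorschlag-bit/Algorithm-Baekjoon- | 프로그래머스/2/12941. 최솟값 만들기/최솟값 만들기.py | solution
-- ===== SOURCE A (Python) =====
-- import heapq
--
-- def solution(A,B):
--     ans = 0
--     heapq.heapify(A)
--     B = [-i for i in B]
--     heapq.heapify(B)
--     while A:
--         a = heapq.heappop(A)
--         b = heapq.heappop(B)
--         ans += a*(-b)
--
--     return ans
-- ===== SOURCE B (Python) =====
-- def solution(A, B):
--     sA = sorted(A)
--     sB = sorted(B)
--     return sum(a * b for a, b in zip(sA, reversed(sB)))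
-- ===== Notes on version B (the rewrite author's own statement) =====
-- stated objective: faster
-- what changed: Replaces the two heapify/heappop loops and the negation trick by sorting both lists once and summing products of A ascending zipped with B descending (return value only; A heapifies its arguments in place, B does not mutate them).
import Mathlib
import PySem

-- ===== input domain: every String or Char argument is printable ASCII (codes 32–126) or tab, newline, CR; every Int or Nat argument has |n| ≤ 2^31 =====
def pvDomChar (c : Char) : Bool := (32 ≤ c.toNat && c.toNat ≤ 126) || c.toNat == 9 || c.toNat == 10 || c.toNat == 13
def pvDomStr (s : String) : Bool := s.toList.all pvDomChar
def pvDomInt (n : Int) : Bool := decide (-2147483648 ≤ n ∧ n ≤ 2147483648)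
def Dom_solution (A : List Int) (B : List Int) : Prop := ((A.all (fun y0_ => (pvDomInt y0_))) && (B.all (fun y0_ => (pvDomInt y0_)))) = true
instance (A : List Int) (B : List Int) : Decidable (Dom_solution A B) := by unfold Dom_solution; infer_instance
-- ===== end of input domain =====

-- B is simpler: two sorts and one zipped sum replace the two heaps, the heappop loop and the
-- negation trick. A heapifies (mutates) its arguments in place; only the return value is
-- compared here.

-- ===== PORT A =====
-- heapq model: heappop removes and returns the minimum of the (multiset held by the) heap.
-- popMin? l = the minimum of l together with l minus that one occurrence (none on []).
def popMin? : List Int → Option (Int × List Int)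
  | [] => none
  | x :: xs =>
    match popMin? xs with
    | none => some (x, [])
    | some (m, rest) => if x ≤ m then some (x, xs) else some (m, x :: rest)

-- the 'while A:' loop: pop the min of A and the min of the negated B, accumulate a*(-b).
-- fuel = |A| only makes the recursion structural; it never cuts the loop short.
-- (when the B-heap is exhausted first, Python raises IndexError; excluded by Pre_.)
def solLoop : Nat → List Int → List Int → Int → Int
  | 0, _, _, ans => ans
  | fuel + 1, hA, hB, ans =>
    match popMin? hA, popMin? hB with
    | some (a, hA'), some (b, hB') => solLoop fuel hA' hB' (ans + a * (-b))
    | _, _ => ans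

def solution (A : List Int) (B : List Int) : Int :=
  solLoop A.length A (B.map (fun i => -i)) 0

-- ===== PORT B =====
def solution_alt (A : List Int) (B : List Int) : Int :=
  let sA := PySem.List.sorted A (fun x => x) false
  let sB := PySem.List.sorted B (fun x => x) false
  (sA.zip sB.reverse).foldl (fun s p => s + p.1 * p.2) 0

-- ===== PRECONDITION & SPEC =====
-- Pre_ excludes exactly the inputs where A raises IndexError (B-heap exhausted before A).
def Pre_solution (A : List Int) (B : List Int) : Prop := A.length ≤ B.length
instance (A : List Int) (B : List Int) : Decidable (Pre_solution A B) := by unfold Pre_solution; infer_instance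
def pvWitness_solution : List Int × List Int := ([1, 4, 2], [5, 4, 4])

def Spec_solution (A : List Int) (B : List Int) (out : Int) : Prop := out = solution_alt A B
instance (A : List Int) (B : List Int) (out : Int) : Decidable (Spec_solution A B out) := by unfold Spec_solution; infer_instance

-- ===== CLAIM (what is proved, stated in full; the proofs are below) =====
def Claim_equal_solution : Prop := ∀ (A : List Int) (B : List Int), Dom_solution A B → Pre_solution A B → Spec_solution A B (solution A B)

-- ===== LEMMAS AND PROOFS =====

-- ascending sort (Python's sorted with identity key)
def msort (l : List Int) : List Int := PySem.List.sorted l (fun x => x) false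

-- recursive form of the zipped accumulation of a*(-b)
def zA : List Int → List Int → Int
  | a :: xs, b :: ys => a * (-b) + zA xs ys
  | _, _ => 0

theorem popMin?_none (l : List Int) : popMin? l = none ↔ l = [] := by
  induction l with
  | nil => simp [popMin?]
  | cons x xs ih =>
    simp only [popMin?]
    cases hx : popMin? xs with
    | none => simp
    | some p => obtain ⟨m, r⟩ := p; by_cases hxm : x ≤ m <;> simp [hxm]

theorem popMin?_length : ∀ (l : List Int) (m : Int) (rest : List Int),
    popMin? l = some (m, rest) → rest.length + 1 = l.length := by
  intro l
  induction l with
  | nil => intro m rest h; simp [popMin?] at h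
  | cons x xs ih =>
    intro m rest h
    simp only [popMin?] at h
    cases hx : popMin? xs with
    | none =>
      rw [hx] at h
      simp at h
      have : xs = [] := (popMin?_none xs).mp hx
      subst this
      simp [← h.2]
    | some p =>
      obtain ⟨m', rest'⟩ := p
      simp only [hx] at h
      have hlen := ih m' rest' hx
      split at h
      · rw [Option.some.injEq, Prod.mk.injEq] at h
        obtain ⟨h1, h2⟩ := h; subst h1; subst h2; simp
      · rw [Option.some.injEq, Prod.mk.injEq] at h
        obtain ⟨h1, h2⟩ := h; subst h1; subst h2
        simp only [List.length_cons]; omega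

theorem popMin?_spec : ∀ (l : List Int) (m : Int) (rest : List Int),
    popMin? l = some (m, rest) → l.Perm (m :: rest) ∧ ∀ y ∈ l, m ≤ y := by
  intro l
  induction l with
  | nil => intro m rest h; simp [popMin?] at h
  | cons x xs ih =>
    intro m rest h
    simp only [popMin?] at h
    cases hx : popMin? xs with
    | none =>
      rw [hx] at h
      simp at h
      obtain ⟨h1, h2⟩ := h
      subst h1; subst h2
      have : xs = [] := (popMin?_none xs).mp hx
      subst this
      exact ⟨List.Perm.refl _, by simp⟩
    | some p =>
      obtain ⟨m', rest'⟩ := p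
      simp only [hx] at h
      obtain ⟨hperm, hmin⟩ := ih m' rest' hx
      split at h <;> rw [Option.some.injEq, Prod.mk.injEq] at h <;>
        obtain ⟨h1, h2⟩ := h <;> subst h1 <;> subst h2
      · refine ⟨List.Perm.refl _, ?_⟩
        intro y hy
        rcases List.mem_cons.mp hy with rfl | hy
        · exact le_refl y
        · exact le_trans (by assumption) (hmin y hy)
      · constructor
        · exact (hperm.cons x).trans (List.Perm.swap m' x rest')
        · intro y hy
          rcases List.mem_cons.mp hy with rfl | hy
          · omega
          · exact hmin y hy

theorem msort_pairwise (l : List Int) : (msort l).Pairwise (· ≤ ·) :=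
  PySem.List.sorted_pairwise l (fun x => x)

theorem msort_perm (l : List Int) : (msort l).Perm l :=
  PySem.List.sorted_perm l (fun x => x) false

theorem msort_pop (l : List Int) (m : Int) (rest : List Int)
    (h : popMin? l = some (m, rest)) : msort l = m :: msort rest := by
  obtain ⟨hperm, hmin⟩ := popMin?_spec l m rest h
  have hp : (m :: msort rest).Perm l :=
    ((msort_perm rest).cons m).trans hperm.symm
  have hpw : (m :: msort rest).Pairwise (· ≤ ·) := by
    refine List.pairwise_cons.mpr ⟨?_, msort_pairwise rest⟩
    intro y hy
    have : y ∈ rest := (msort_perm rest).mem_iff.mp hy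
    exact hmin y (hperm.mem_iff.mpr (List.mem_cons_of_mem _ this))
  exact PySem.List.sorted_id_eq_of_perm_of_pairwise l (m :: msort rest) hp hpw

theorem solLoop_eq : ∀ (n : ℕ) (hA hB : List Int) (ans : Int), hA.length = n →
    hA.length ≤ hB.length → solLoop n hA hB ans = ans + zA (msort hA) (msort hB) := by
  intro n
  induction n with
  | zero =>
    intro hA hB ans hlen _
    have : hA = [] := List.length_eq_zero_iff.mp hlen
    subst this
    have h0 : msort ([] : List Int) = [] := rfl
    simp only [solLoop, h0, zA]
    omega
  | succ k ih =>
    intro hA hB ans hlen hle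
    cases ha : popMin? hA with
    | none =>
      exfalso
      have : hA = [] := (popMin?_none hA).mp ha
      subst this; simp at hlen
    | some p =>
      obtain ⟨a, hA'⟩ := p
      cases hb : popMin? hB with
      | none =>
        exfalso
        have : hB = [] := (popMin?_none hB).mp hb
        subst this
        have h0 : hA.length ≤ 0 := by simpa using hle
        omega
      | some q =>
        obtain ⟨b, hB'⟩ := q
        have l1 := popMin?_length hA a hA' ha
        have l2 := popMin?_length hB b hB' hb
        simp only [solLoop, ha, hb]
        rw [ih hA' hB' (ans + a * (-b)) (by omega) (by omega)]
        rw [msort_pop hA a hA' ha, msort_pop hB b hB' hb]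
        simp only [zA]
        ring

-- sorting the negated list is the negated reverse of the ascending sort
theorem msort_map_neg (B : List Int) :
    msort (B.map (fun i => -i)) = ((msort B).reverse).map (fun i => -i) := by
  have hp : (((msort B).reverse).map (fun i : Int => -i)).Perm (B.map (fun i => -i)) :=
    ((List.reverse_perm (msort B)).trans (msort_perm B)).map _
  have hpw : (((msort B).reverse).map (fun i : Int => -i)).Pairwise (· ≤ ·) := by
    rw [List.pairwise_map, List.pairwise_reverse]
    exact (msort_pairwise B).imp (by intro a b h; omega)
  exact PySem.List.sorted_id_eq_of_perm_of_pairwise _ _ hp hpw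

theorem foldl_mul_shift : ∀ (l : List (Int × Int)) (c : Int),
    l.foldl (fun s p => s + p.1 * p.2) c = c + l.foldl (fun s p => s + p.1 * p.2) 0 := by
  intro l
  induction l with
  | nil => simp
  | cons p t ih =>
    intro c
    simp only [List.foldl_cons]
    rw [ih (c + p.1 * p.2), ih (0 + p.1 * p.2)]
    ring

theorem zA_map_neg : ∀ (xs ys : List Int),
    zA xs (ys.map (fun i => -i)) = (xs.zip ys).foldl (fun s p => s + p.1 * p.2) 0 := by
  intro xs
  induction xs with
  | nil => intro ys; cases ys <;> simp [zA]
  | cons a xs ih =>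
    intro ys
    cases ys with
    | nil => simp [zA]
    | cons b t =>
      simp only [List.map_cons, zA, List.zip_cons_cons, List.foldl_cons]
      rw [ih t, foldl_mul_shift _ (0 + a * b)]
      ring

-- ===== VERDICT (by name: the statement is the Claim_ definition above) =====
theorem solution_spec : Claim_equal_solution := by
  intro A B _ hpre
  unfold Spec_solution solution solution_alt
  rw [solLoop_eq A.length A (B.map (fun i => -i)) 0 rfl (by simpa using hpre)]
  rw [msort_map_neg, zA_map_neg]
  simp [msort]
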